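-- pv_equiv track=rewrite | github.com/ogorodnikov/Pycheck | Other/power_supply.py | get_connected_nodes
-- ===== SOURCE A (Python) =====
-- def get_connected_nodes(network, node, power_range):
--     connected_nodes = {node}
--     if power_range < 1:
--         return connected_nodes
--     for edge in network:
--         a, b = edge
--         if a == node:
--             connected_nodes |= get_connected_nodes(network - {edge}, b, power_range - 1) | {b}
--         elif b == node:
--             connected_nodes |= get_connected_nodes(network - {edge}, a, power_range - 1) | {a}
--     return connected_nodes
-- ===== SOURCE B (Python) =====
-- def get_connected_nodes(network, node, power_range):
--     # Level-synchronous BFS: expand one hop per round, up to power_range rounds.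
--     visited = {node}
--     frontier = {node}
--     for _ in range(max(0, power_range)):
--         nxt = set()
--         for a, b in network:
--             if a in frontier and b not in visited:
--                 nxt.add(b)
--             if b in frontier and a not in visited:
--                 nxt.add(a)
--         if not nxt:
--             break
--         visited |= nxt
--         frontier = nxt
--     return visited
-- ===== Notes on version B (the rewrite author's own statement) =====
-- stated objective: faster
-- what changed: Replaces A's exponential recursion (which re-explores the graph along every edge-distinct walk, removing one edge per recursive call) with an iterative level-synchronous BFS that expands a frontier one hop per round with a visited set, scanning the edge list once per round.
import Mathlib
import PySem

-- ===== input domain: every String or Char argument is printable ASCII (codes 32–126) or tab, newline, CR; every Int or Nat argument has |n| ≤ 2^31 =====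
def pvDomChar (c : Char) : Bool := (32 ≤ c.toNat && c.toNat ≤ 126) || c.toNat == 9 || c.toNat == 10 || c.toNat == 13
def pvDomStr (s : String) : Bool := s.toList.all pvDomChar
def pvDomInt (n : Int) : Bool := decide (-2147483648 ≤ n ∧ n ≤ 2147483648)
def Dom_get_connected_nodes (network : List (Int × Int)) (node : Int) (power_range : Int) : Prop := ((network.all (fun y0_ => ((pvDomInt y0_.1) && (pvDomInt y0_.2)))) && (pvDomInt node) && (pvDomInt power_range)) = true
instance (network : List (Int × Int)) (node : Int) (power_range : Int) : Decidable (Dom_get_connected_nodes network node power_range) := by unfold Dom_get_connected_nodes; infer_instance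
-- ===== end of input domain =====

-- B replaces A's exponential edge-removing recursion by a level-synchronous BFS (faster: asymptotic).
-- Both Pythons RETURN A SET of ints; a Python set has no canonical order, so each port renders its
-- result set as the sorted list of its elements (the algorithms themselves are ported literally).

-- ===== PORT A =====
-- Mutual recursion: gcnA is A's body, gcnALoop its 'for edge in network' loop ('km' is the
-- power_range-1 passed at the recursive call sites; 'network - {edge}' is the filter).
mutual
def gcnA (network : List (Int × Int)) (node : Int) (power_range : Int) : PySem.Set Int :=
  let connected : PySem.Set Int := PySem.Set.ofList [node]
  if power_range < 1 then connected
  else gcnALoop network network node (power_range - 1) connected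
termination_by (power_range.toNat, 1, 0)
decreasing_by all_goals (simp only [Prod.lex_def]; omega)

def gcnALoop (network : List (Int × Int)) (edges : List (Int × Int)) (node : Int)
    (km : Int) (acc : PySem.Set Int) : PySem.Set Int :=
  match edges with
  | [] => acc
  | e :: rest =>
      let acc' :=
        if e.1 = node then
          PySem.Set.union acc (PySem.Set.union (gcnA (network.filter (fun x => x ≠ e)) e.2 km) (PySem.Set.ofList [e.2]))
        else if e.2 = node then
          PySem.Set.union acc (PySem.Set.union (gcnA (network.filter (fun x => x ≠ e)) e.1 km) (PySem.Set.ofList [e.1]))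
        else acc
      gcnALoop network rest node km acc'
termination_by (km.toNat + 1, 0, edges.length)
decreasing_by all_goals first | (simp only [Prod.lex_def]; omega) | (apply Prod.Lex.right; apply Prod.Lex.right; simp)
end

def get_connected_nodes (network : List (Int × Int)) (node : Int) (power_range : Int) : List Int :=
  PySem.List.sorted (gcnA network node power_range) (fun x => x) false

-- ===== PORT B =====
-- one BFS round: nxt = { the not-yet-visited endpoints of edges out of the frontier }
def bfsStep (network : List (Int × Int)) (frontier visited : PySem.Set Int) : PySem.Set Int :=
  network.foldl (fun acc e =>
    let acc1 := if PySem.Set.contains frontier e.1 && !PySem.Set.contains visited e.2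
                then PySem.Set.add acc e.2 else acc
    if PySem.Set.contains frontier e.2 && !PySem.Set.contains visited e.1
    then PySem.Set.add acc1 e.1 else acc1)
    PySem.Set.empty

-- the 'for _ in range(max(0, power_range))' loop, with the early 'break' on an empty frontier
def bfsLoop (network : List (Int × Int)) (fuel : Nat) (visited frontier : PySem.Set Int) : PySem.Set Int :=
  match fuel with
  | 0 => visited
  | f + 1 =>
      let nxt := bfsStep network frontier visited
      if nxt.isEmpty then visited
      else bfsLoop network f (PySem.Set.union visited nxt) nxt

def get_connected_nodes_alt (network : List (Int × Int)) (node : Int) (power_range : Int) : List Int :=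
  PySem.List.sorted
    (bfsLoop network (max 0 power_range).toNat (PySem.Set.ofList [node]) (PySem.Set.ofList [node]))
    (fun x => x) false

-- ===== PRECONDITION & SPEC =====
def Spec_get_connected_nodes (network : List (Int × Int)) (node : Int) (power_range : Int) (out : List Int) : Prop := out = get_connected_nodes_alt network node power_range
instance (network : List (Int × Int)) (node : Int) (power_range : Int) (out : List Int) : Decidable (Spec_get_connected_nodes network node power_range out) := by unfold Spec_get_connected_nodes; infer_instance

-- ===== CLAIM (what is proved, stated in full; the proofs are below) =====
def Claim_equal_get_connected_nodes : Prop := ∀ (network : List (Int × Int)) (node : Int) (power_range : Int), Dom_get_connected_nodes network node power_range → Spec_get_connected_nodes network node power_range (get_connected_nodes network node power_range)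

-- ===== LEMMAS AND PROOFS =====

-- u and v are the endpoints of some edge of net (in either direction)
def Adj (net : List (Int × Int)) (u v : Int) : Prop :=
  ∃ e ∈ net, (e.1 = u ∧ e.2 = v) ∨ (e.2 = u ∧ e.1 = v)

-- there is a walk of length ≤ n from u to v
inductive Reach (net : List (Int × Int)) : Int → Nat → Int → Prop
  | refl (u : Int) (n : Nat) : Reach net u n u
  | step {u w v : Int} {n : Nat} : Adj net u w → Reach net w n v → Reach net u (n + 1) v

theorem reach_zero {net : List (Int × Int)} {u v : Int} (h : Reach net u 0 v) : u = v := by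
  cases h; rfl

theorem reach_mono {net : List (Int × Int)} {u v : Int} {n m : Nat}
    (h : Reach net u n v) (hnm : n ≤ m) : Reach net u m v := by
  induction h generalizing m with
  | refl => exact Reach.refl _ _
  | step ha _ ih =>
      rcases m with _ | m
      · omega
      · exact Reach.step ha (ih (by omega))

theorem adj_mono {net net' : List (Int × Int)} {u v : Int}
    (hsub : ∀ e ∈ net', e ∈ net) (h : Adj net' u v) : Adj net u v := by
  obtain ⟨e, he, hor⟩ := h
  exact ⟨e, hsub e he, hor⟩

theorem reach_mono_net {net net' : List (Int × Int)} {u v : Int} {n : Nat}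
    (hsub : ∀ e ∈ net', e ∈ net) (h : Reach net' u n v) : Reach net u n v := by
  induction h with
  | refl => exact Reach.refl _ _
  | step ha _ ih => exact Reach.step (adj_mono hsub ha) ih

theorem reach_snoc {net : List (Int × Int)} {u w v : Int} {n : Nat}
    (h : Reach net u n w) (ha : Adj net w v) : Reach net u (n + 1) v := by
  induction h with
  | refl => exact Reach.step ha (Reach.refl _ _)
  | step ha' _ ih => exact Reach.step ha' (ih ha)

theorem reach_snoc_elim {net : List (Int × Int)} {u v : Int} {n : Nat}
    (h : Reach net u (n + 1) v) :
    Reach net u n v ∨ ∃ w, Reach net u n w ∧ Adj net w v := by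
  induction n generalizing u v with
  | zero =>
      cases h with
      | refl => exact Or.inl (Reach.refl _ _)
      | step ha hr =>
          obtain rfl := reach_zero hr
          exact Or.inr ⟨_, Reach.refl _ _, ha⟩
  | succ n ih =>
      cases h with
      | refl => exact Or.inl (Reach.refl _ _)
      | step ha hr =>
          rcases ih hr with h1 | ⟨w2, hw2, ha2⟩
          · exact Or.inl (Reach.step ha h1)
          · exact Or.inr ⟨w2, Reach.step ha hw2, ha2⟩

theorem reach_stable {net : List (Int × Int)} {s : Int} {i : Nat}
    (hst : ∀ x, Reach net s (i + 1) x → Reach net s i x) :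
    ∀ (j : Nat) (x : Int), Reach net s (i + j) x → Reach net s i x := by
  intro j
  induction j with
  | zero => intro x hx; exact hx
  | succ j ih =>
      intro x hx
      rcases reach_snoc_elim (show Reach net s ((i + j) + 1) x by
        simpa [Nat.add_assoc] using hx) with h1 | ⟨w, hw, ha⟩
      · exact ih x h1
      · exact hst x (reach_snoc (ih w hw) ha)

-- vertex-list walks: WalkV net u vs holds when u,vs is a walk along edges of net
-- last element of vs, default d (our own tiny helper; kernel-reducible)
def lastD : List Int → Int → Int
  | [], d => d
  | a :: l, _ => lastD l a

def WalkV (net : List (Int × Int)) : Int → List Int → Prop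
  | _, [] => True
  | u, w :: rest => Adj net u w ∧ WalkV net w rest

theorem getLastD_append' {l1 l2 : List Int} {d : Int} :
    lastD (l1 ++ l2) d = lastD l2 (lastD l1 d) := by
  induction l1 generalizing d with
  | nil => rfl
  | cons a l ih => simp [lastD, ih]

theorem reach_iff_walk {net : List (Int × Int)} {u v : Int} {n : Nat} :
    Reach net u n v ↔ ∃ vs, WalkV net u vs ∧ vs.length ≤ n ∧ lastD vs u = v := by
  constructor
  · intro h
    induction h with
    | refl => exact ⟨[], trivial, by simp, rfl⟩
    | step ha _ ih =>
        obtain ⟨vs, hw, hl, he⟩ := ih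
        exact ⟨_ :: vs, ⟨ha, hw⟩, by simpa using hl, by simpa [lastD] using he⟩
  · rintro ⟨vs, hw, hl, he⟩
    induction vs generalizing u n with
    | nil => subst he; exact Reach.refl _ _
    | cons w rest ih =>
        rcases n with _ | n
        · simp at hl
        · exact Reach.step hw.1 (ih hw.2 (by simpa using hl) (by simpa [lastD] using he))

theorem walkv_append {net : List (Int × Int)} {l1 l2 : List Int} {u : Int}
    (h : WalkV net u (l1 ++ l2)) : WalkV net (lastD l1 u) l2 := by
  induction l1 generalizing u with
  | nil => exact h
  | cons a l ih => simpa [lastD] using ih h.2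

-- A walk can be shortened to one that never revisits its start.
theorem walk_avoid {net : List (Int × Int)} {u v : Int} :
    ∀ (n : Nat) (vs : List Int), vs.length ≤ n →
      WalkV net u vs → lastD vs u = v →
      ∃ vs', vs'.length ≤ vs.length ∧ WalkV net u vs' ∧ lastD vs' u = v ∧ u ∉ vs' := by
  intro n
  induction n with
  | zero =>
      intro vs hl hw he
      obtain rfl : vs = [] := List.eq_nil_of_length_eq_zero (by omega)
      exact ⟨[], by simp, trivial, he, by simp⟩
  | succ n ih =>
      intro vs hl hw he
      by_cases hu : u ∈ vs
      · obtain ⟨l1, l2, rfl⟩ := List.append_of_mem hu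
        have h2 : WalkV net u l2 := by
          have := walkv_append (l1 := l1 ++ [u]) (l2 := l2) (by simpa using hw)
          simpa [getLastD_append'] using this
        have he2 : lastD l2 u = v := by
          simpa [getLastD_append', lastD] using he
        obtain ⟨vs', h1', h2', h3', h4'⟩ :=
          ih l2 (by simp at hl ⊢; omega) h2 he2
        exact ⟨vs', by simp at h1' ⊢; omega, h2', h3', h4'⟩
      · exact ⟨vs, le_rfl, hw, he, hu⟩

-- transfer a walk into net - {e} when none of its vertices is u (an endpoint of e)
theorem walk_filter {net : List (Int × Int)} {e : Int × Int} {u : Int}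
    (hu : e.1 = u ∨ e.2 = u) :
    ∀ (rest : List Int) (w : Int), WalkV net w rest → w ≠ u →
      (∀ y ∈ rest, y ≠ u) → WalkV (net.filter (fun x => x ≠ e)) w rest := by
  intro rest
  induction rest with
  | nil => intro w _ _ _; trivial
  | cons y l ih =>
      intro w hw hwu hall
      obtain ⟨⟨p, hp, hpor⟩, htail⟩ := hw
      have hyu : y ≠ u := hall y (by simp)
      have hpe : p ≠ e := by
        rintro rfl
        rcases hpor with ⟨h1, h2⟩ | ⟨h1, h2⟩ <;> rcases hu with h3 | h3 <;>
          simp_all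
      refine ⟨⟨p, ?_, hpor⟩, ih y htail hyu (fun z hz => hall z (by simp [hz]))⟩
      simp [List.mem_filter, hp, hpe]

-- membership characterisation of A's loop
theorem mem_gcnALoop {network : List (Int × Int)} {node : Int} {km : Int} {x : Int} :
    ∀ (edges : List (Int × Int)) (acc : PySem.Set Int),
      x ∈ gcnALoop network edges node km acc ↔
        x ∈ acc ∨ ∃ e ∈ edges,
          (e.1 = node ∧ (x ∈ gcnA (network.filter (fun y => y ≠ e)) e.2 km ∨ x = e.2)) ∨
          (e.1 ≠ node ∧ e.2 = node ∧ (x ∈ gcnA (network.filter (fun y => y ≠ e)) e.1 km ∨ x = e.1)) := by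
  intro edges
  induction edges with
  | nil => intro acc; rw [gcnALoop]; simp
  | cons e rest ih =>
      intro acc
      rw [gcnALoop]
      by_cases h1 : e.1 = node
      · rw [if_pos h1, ih]
        simp only [PySem.Set.mem_union, PySem.Set.mem_ofList, List.mem_cons, List.not_mem_nil,
          or_false]
        constructor
        · rintro ((h | (h | h)) | ⟨f, hf, hor⟩)
          · exact Or.inl h
          · exact Or.inr ⟨e, Or.inl rfl, Or.inl ⟨h1, Or.inl h⟩⟩
          · exact Or.inr ⟨e, Or.inl rfl, Or.inl ⟨h1, Or.inr h⟩⟩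
          · exact Or.inr ⟨f, Or.inr hf, hor⟩
        · rintro (h | ⟨f, (rfl | hf), hor⟩)
          · exact Or.inl (Or.inl h)
          · rcases hor with ⟨_, h | h⟩ | ⟨hne, _⟩
            · exact Or.inl (Or.inr (Or.inl h))
            · exact Or.inl (Or.inr (Or.inr h))
            · exact absurd h1 hne
          · exact Or.inr ⟨f, hf, hor⟩
      · by_cases h2 : e.2 = node
        · rw [if_neg h1, if_pos h2, ih]
          simp only [PySem.Set.mem_union, PySem.Set.mem_ofList, List.mem_cons, List.not_mem_nil,
            or_false]
          constructor
          · rintro ((h | (h | h)) | ⟨f, hf, hor⟩)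
            · exact Or.inl h
            · exact Or.inr ⟨e, Or.inl rfl, Or.inr ⟨h1, h2, Or.inl h⟩⟩
            · exact Or.inr ⟨e, Or.inl rfl, Or.inr ⟨h1, h2, Or.inr h⟩⟩
            · exact Or.inr ⟨f, Or.inr hf, hor⟩
          · rintro (h | ⟨f, (rfl | hf), hor⟩)
            · exact Or.inl (Or.inl h)
            · rcases hor with ⟨hne, _⟩ | ⟨_, _, h | h⟩
              · exact absurd hne h1
              · exact Or.inl (Or.inr (Or.inl h))
              · exact Or.inl (Or.inr (Or.inr h))
            · exact Or.inr ⟨f, hf, hor⟩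
        · rw [if_neg h1, if_neg h2, ih]
          simp only [List.mem_cons]
          constructor
          · rintro (h | ⟨f, hf, hor⟩)
            · exact Or.inl h
            · exact Or.inr ⟨f, Or.inr hf, hor⟩
          · rintro (h | ⟨f, (rfl | hf), hor⟩)
            · exact Or.inl h
            · rcases hor with ⟨hne, _⟩ | ⟨_, hne, _⟩
              · exact absurd hne h1
              · exact absurd hne h2
            · exact Or.inr ⟨f, hf, hor⟩

theorem mem_gcnA_of_lt {network : List (Int × Int)} {node : Int} {k : Int} (h : k < 1) :
    gcnA network node k = PySem.Set.ofList [node] := by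
  rw [gcnA]; simp [h]

theorem mem_gcnA_of_ge {network : List (Int × Int)} {node : Int} {k : Int} (h : ¬ k < 1) {x : Int} :
    x ∈ gcnA network node k ↔
      x = node ∨ ∃ e ∈ network,
        (e.1 = node ∧ (x ∈ gcnA (network.filter (fun y => y ≠ e)) e.2 (k - 1) ∨ x = e.2)) ∨
        (e.1 ≠ node ∧ e.2 = node ∧ (x ∈ gcnA (network.filter (fun y => y ≠ e)) e.1 (k - 1) ∨ x = e.1)) := by
  rw [gcnA]
  simp only [if_neg h, mem_gcnALoop, PySem.Set.mem_ofList, List.mem_singleton]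

theorem self_mem_gcnA {network : List (Int × Int)} {node : Int} {k : Int} :
    node ∈ gcnA network node k := by
  by_cases h : k < 1
  · simp [mem_gcnA_of_lt h, PySem.Set.mem_ofList]
  · exact (mem_gcnA_of_ge h).2 (Or.inl rfl)

theorem filter_subset' {net : List (Int × Int)} {e : Int × Int} :
    ∀ f ∈ net.filter (fun y => y ≠ e), f ∈ net := fun _ hf => (List.mem_filter.1 hf).1

theorem gcnA_subset_reach_aux :
    ∀ (m : Nat) (net : List (Int × Int)) (node k x : Int), k.toNat ≤ m →
      x ∈ gcnA net node k → Reach net node k.toNat x := by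
  intro m
  induction m with
  | zero =>
      intro net node k x hm hx
      rw [mem_gcnA_of_lt (by omega)] at hx
      obtain rfl : x = node := by simpa [PySem.Set.mem_ofList] using hx
      exact Reach.refl _ _
  | succ m ih =>
      intro net node k x hm hx
      by_cases hk : k < 1
      · rw [mem_gcnA_of_lt hk] at hx
        obtain rfl : x = node := by simpa [PySem.Set.mem_ofList] using hx
        exact Reach.refl _ _
      · rcases (mem_gcnA_of_ge hk).1 hx with rfl | ⟨e, he, hor⟩
        · exact Reach.refl _ _
        · have hk1 : (1 : Int) ≤ k := by omega
          rcases hor with ⟨h1, hrec | rfl⟩ | ⟨_, h2, hrec | rfl⟩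
          · have hadj : Adj net node e.2 := ⟨e, he, Or.inl ⟨h1, rfl⟩⟩
            have hstep : Reach net node ((k - 1).toNat + 1) x :=
              Reach.step hadj (reach_mono_net filter_subset' (ih _ e.2 (k - 1) x (by omega) hrec))
            exact reach_mono hstep (by omega)
          · exact reach_mono (Reach.step ⟨e, he, Or.inl ⟨h1, rfl⟩⟩ (Reach.refl _ 0)) (by omega)
          · have hadj : Adj net node e.1 := ⟨e, he, Or.inr ⟨h2, rfl⟩⟩
            have hstep : Reach net node ((k - 1).toNat + 1) x :=
              Reach.step hadj (reach_mono_net filter_subset' (ih _ e.1 (k - 1) x (by omega) hrec))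
            exact reach_mono hstep (by omega)
          · exact reach_mono (Reach.step ⟨e, he, Or.inr ⟨h2, rfl⟩⟩ (Reach.refl _ 0)) (by omega)

theorem gcnA_subset_reach {network : List (Int × Int)} {node : Int} {k : Int} {x : Int}
    (h : x ∈ gcnA network node k) : Reach network node k.toNat x :=
  gcnA_subset_reach_aux k.toNat network node k x le_rfl h

theorem reach_subset_gcnA_aux :
    ∀ (m : Nat) (net : List (Int × Int)) (node k x : Int) (n : Nat), n ≤ m →
      Reach net node n x → n ≤ k.toNat → x ∈ gcnA net node k := by
  intro m
  induction m with
  | zero =>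
      intro net node k x n hm hr _
      obtain rfl : n = 0 := by omega
      obtain rfl : node = x := reach_zero hr
      exact self_mem_gcnA
  | succ m ih =>
      intro net node k x n hm hr hn
      obtain ⟨vs, hw, hl, he⟩ := reach_iff_walk.1 hr
      obtain ⟨vs', hl', hw', he', hnm⟩ := walk_avoid n vs (by omega) hw he
      rcases hvs : vs' with _ | ⟨w, rest⟩
      · subst hvs
        obtain rfl : x = node := by simpa [lastD] using he'.symm
        exact self_mem_gcnA
      · subst hvs
        have hwne : w ≠ node := fun hwn => hnm (by simp [hwn])
        have hall : ∀ y ∈ rest, y ≠ node := fun y hy hyn => hnm (by simp [hyn ▸ hy])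
        obtain ⟨⟨e, he, hor⟩, wtail⟩ := hw'
        have hk1 : ¬ k < 1 := by
          have : 1 ≤ n := by
            have := hl'
            simp at this
            omega
          omega
        have hu : e.1 = node ∨ e.2 = node := by
          rcases hor with ⟨h1, _⟩ | ⟨h1, _⟩
          · exact Or.inl h1
          · exact Or.inr h1
        have wtail' := walk_filter hu rest w wtail hwne hall
        have hreach : Reach (net.filter (fun y => y ≠ e)) w rest.length x :=
          reach_iff_walk.2 ⟨rest, wtail', le_rfl, by simpa [lastD] using he'⟩
        have hlen : rest.length ≤ m ∧ rest.length ≤ (k - 1).toNat := by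
          have := hl'
          simp at this
          omega
        have hmem := ih _ w (k - 1) x rest.length hlen.1 hreach hlen.2
        apply (mem_gcnA_of_ge hk1).2
        rcases hor with ⟨h1, h2⟩ | ⟨h1, h2⟩
        · exact Or.inr ⟨e, he, Or.inl ⟨h1, Or.inl (h2 ▸ hmem)⟩⟩
        · have hne : e.1 ≠ node := fun hc => hwne (by rw [← h2, hc])
          exact Or.inr ⟨e, he, Or.inr ⟨hne, h1, Or.inl (h2 ▸ hmem)⟩⟩

theorem reach_subset_gcnA {network : List (Int × Int)} {node : Int} {k : Int} {x : Int} {n : Nat}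
    (h : Reach network node n x) (hn : n ≤ k.toNat) : x ∈ gcnA network node k :=
  reach_subset_gcnA_aux n network node k x n le_rfl h hn

theorem mem_bfsBody {frontier visited : PySem.Set Int} {x : Int} (a : PySem.Set Int) (e : Int × Int) :
    (x ∈ (if PySem.Set.contains frontier e.2 && !PySem.Set.contains visited e.1
          then PySem.Set.add (if PySem.Set.contains frontier e.1 && !PySem.Set.contains visited e.2
                              then PySem.Set.add a e.2 else a) e.1
          else (if PySem.Set.contains frontier e.1 && !PySem.Set.contains visited e.2
                then PySem.Set.add a e.2 else a))) ↔
      x ∈ a ∨ (((e.1 ∈ frontier ∧ e.2 = x) ∨ (e.2 ∈ frontier ∧ e.1 = x)) ∧ x ∉ visited) := by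
  split_ifs with h2 h1 h1 <;>
    simp only [Bool.and_eq_true, Bool.not_eq_true', ← Bool.not_eq_true,
      PySem.Set.contains_iff, PySem.Set.mem_add] at * <;>
    constructor <;> intro h <;> rcases h with h | h <;>
    try tauto
  all_goals
    try (rcases h with ⟨h | h, hv⟩ <;> try tauto)
  all_goals
    first
      | (rcases h with ⟨hm, rfl⟩; tauto)
      | (subst_vars; tauto)


theorem mem_bfsStep_aux {frontier visited : PySem.Set Int} {x : Int} :
    ∀ (l : List (Int × Int)) (acc : PySem.Set Int),
      x ∈ l.foldl (fun acc e =>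
        let acc1 := if PySem.Set.contains frontier e.1 && !PySem.Set.contains visited e.2
                    then PySem.Set.add acc e.2 else acc
        if PySem.Set.contains frontier e.2 && !PySem.Set.contains visited e.1
        then PySem.Set.add acc1 e.1 else acc1) acc ↔
      x ∈ acc ∨ ∃ e ∈ l, ((e.1 ∈ frontier ∧ e.2 = x) ∨ (e.2 ∈ frontier ∧ e.1 = x)) ∧ x ∉ visited := by
  intro l
  induction l with
  | nil => intro acc; simp
  | cons e rest ih =>
      intro acc
      rw [List.foldl_cons, ih, mem_bfsBody]
      simp only [List.mem_cons]
      constructor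
      · rintro (h | ⟨f, hf, hor⟩)
        · rcases h with h | h
          · exact Or.inl h
          · exact Or.inr ⟨e, Or.inl rfl, h⟩
        · exact Or.inr ⟨f, Or.inr hf, hor⟩
      · rintro (h | ⟨f, (rfl | hf), hor⟩)
        · exact Or.inl (Or.inl h)
        · exact Or.inl (Or.inr hor)
        · exact Or.inr ⟨f, hf, hor⟩

theorem mem_bfsStep {network : List (Int × Int)} {frontier visited : PySem.Set Int} {x : Int} :
    x ∈ bfsStep network frontier visited ↔
      (∃ u ∈ frontier, Adj network u x) ∧ x ∉ visited := by
  rw [bfsStep, mem_bfsStep_aux]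
  constructor
  · rintro (h | ⟨e, he, (⟨h1, rfl⟩ | ⟨h1, rfl⟩), hv⟩)
    · simp [PySem.Set.empty] at h
    · exact ⟨⟨e.1, h1, ⟨e, he, Or.inl ⟨rfl, rfl⟩⟩⟩, hv⟩
    · exact ⟨⟨e.2, h1, ⟨e, he, Or.inr ⟨rfl, rfl⟩⟩⟩, hv⟩
  · rintro ⟨⟨u, hu, e, he, (⟨rfl, rfl⟩ | ⟨rfl, rfl⟩)⟩, hv⟩
    · exact Or.inr ⟨e, he, Or.inl ⟨hu, rfl⟩, hv⟩
    · exact Or.inr ⟨e, he, Or.inr ⟨hu, rfl⟩, hv⟩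

theorem bfsLoop_mem {network : List (Int × Int)} {node : Int} :
    ∀ (fuel : Nat) (i : Nat) (visited frontier : PySem.Set Int),
      (∀ x, x ∈ visited ↔ Reach network node i x) →
      (∀ x, x ∈ frontier → x ∈ visited) →
      (∀ x, Reach network node (i + 1) x → Reach network node i x ∨ ∃ u ∈ frontier, Adj network u x) →
      ∀ x, x ∈ bfsLoop network fuel visited frontier ↔ Reach network node (i + fuel) x := by
  intro fuel
  induction fuel with
  | zero => intro i visited frontier h1 _ _ x; simpa using h1 x
  | succ f ih =>
      intro i visited frontier h1 h2 h3 x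
      rw [bfsLoop]
      by_cases hemp : (bfsStep network frontier visited).isEmpty
      · rw [if_pos hemp]
        have hnone : ∀ y, y ∉ bfsStep network frontier visited := by
          intro y hy
          rw [List.isEmpty_iff.1 hemp] at hy
          exact (List.not_mem_nil) hy
        have hstab : ∀ y, Reach network node (i + 1) y → Reach network node i y := by
          intro y hy
          rcases h3 y hy with h | ⟨u, hu, ha⟩
          · exact h
          · by_cases hv : y ∈ visited
            · exact (h1 y).1 hv
            · exact absurd (mem_bfsStep.2 ⟨⟨u, hu, ha⟩, hv⟩) (hnone y)
        constructor
        · intro hx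
          exact reach_mono ((h1 x).1 hx) (by omega)
        · intro hx
          exact (h1 x).2 (reach_stable hstab (f + 1) x hx)
      · rw [if_neg hemp]
        have hmain := ih (i + 1) (PySem.Set.union visited (bfsStep network frontier visited))
          (bfsStep network frontier visited) ?_ ?_ ?_ x
        · rw [hmain]
          constructor <;> intro h <;> exact reach_mono h (by omega)
        · intro y
          rw [PySem.Set.mem_union]
          constructor
          · rintro (hy | hy)
            · exact reach_mono ((h1 y).1 hy) (by omega)
            · obtain ⟨⟨u, hu, ha⟩, _⟩ := mem_bfsStep.1 hy
              exact reach_snoc ((h1 u).1 (h2 u hu)) ha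
          · intro hy
            rcases h3 y hy with h | ⟨u, hu, ha⟩
            · exact Or.inl ((h1 y).2 h)
            · by_cases hv : y ∈ visited
              · exact Or.inl hv
              · exact Or.inr (mem_bfsStep.2 ⟨⟨u, hu, ha⟩, hv⟩)
        · intro y hy
          rw [PySem.Set.mem_union]
          exact Or.inr hy
        · intro y hy
          rcases reach_snoc_elim (show Reach network node ((i + 1) + 1) y from hy) with h | ⟨w, hw, ha⟩
          · exact Or.inl h
          · by_cases hwi : Reach network node i w
            · exact Or.inl (reach_snoc hwi ha)
            · have hwv : w ∉ visited := fun hc => hwi ((h1 w).1 hc)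
              rcases h3 w hw with h | ⟨u, hu, hau⟩
              · exact absurd h hwi
              · exact Or.inr ⟨w, mem_bfsStep.2 ⟨⟨u, hu, hau⟩, hwv⟩, ha⟩

theorem nodup_gcnALoop {network : List (Int × Int)} {node km : Int} :
    ∀ (edges : List (Int × Int)) (acc : PySem.Set Int), acc.Nodup →
      (gcnALoop network edges node km acc).Nodup := by
  intro edges
  induction edges with
  | nil => intro acc h; rw [gcnALoop]; exact h
  | cons e rest ih =>
      intro acc h
      rw [gcnALoop]
      split_ifs with h1 h2 <;> apply ih <;>
        first
        | exact PySem.Set.nodup_union _ _ h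
        | exact h

theorem nodup_gcnA {network : List (Int × Int)} {node : Int} {k : Int} :
    (gcnA network node k).Nodup := by
  rw [gcnA]
  split_ifs with h
  · exact PySem.Set.nodup_ofList _
  · exact nodup_gcnALoop _ _ (PySem.Set.nodup_ofList _)

theorem nodup_bfsLoop {network : List (Int × Int)} :
    ∀ (fuel : Nat) (visited frontier : PySem.Set Int), visited.Nodup →
      (bfsLoop network fuel visited frontier).Nodup := by
  intro fuel
  induction fuel with
  | zero => intro visited frontier h; exact h
  | succ f ih =>
      intro visited frontier h
      rw [bfsLoop]
      split_ifs with h1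
      · exact h
      · exact ih _ _ (PySem.Set.nodup_union _ _ h)

-- ===== VERDICT (by name: the statement is the Claim_ definition above) =====
theorem mem_ports_iff {network : List (Int × Int)} {node k x : Int} :
    x ∈ gcnA network node k ↔
      x ∈ bfsLoop network (max 0 k).toNat (PySem.Set.ofList [node]) (PySem.Set.ofList [node]) := by
  have hb := bfsLoop_mem (network := network) (node := node) (max 0 k).toNat 0
    (PySem.Set.ofList [node]) (PySem.Set.ofList [node]) ?_ (fun x h => h) ?_ x
  · rw [hb]
    have hmax : (max 0 k).toNat = k.toNat := by omega
    rw [hmax]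
    constructor
    · intro h
      simpa using gcnA_subset_reach h
    · intro h
      exact reach_subset_gcnA (by simpa using h) le_rfl
  · intro y
    simp only [PySem.Set.mem_ofList, List.mem_singleton]
    constructor
    · rintro rfl; exact Reach.refl _ _
    · intro h; exact (reach_zero h).symm
  · intro y hy
    rcases reach_snoc_elim hy with h | ⟨w, hw, ha⟩
    · exact Or.inl h
    · obtain rfl := (reach_zero hw).symm
      exact Or.inr ⟨w, by simp [PySem.Set.mem_ofList], ha⟩

theorem get_connected_nodes_spec : Claim_equal_get_connected_nodes := by
  intro network node power_range _
  unfold Spec_get_connected_nodes get_connected_nodes get_connected_nodes_alt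
  apply PySem.List.sorted_eq_sorted_of_perm _ _ _ (fun a b h => h)
  refine (List.perm_ext_iff_of_nodup nodup_gcnA (nodup_bfsLoop _ _ _ (PySem.Set.nodup_ofList _))).2 ?_
  intro a
  exact mem_ports_iff
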